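-- pv_equiv track=rewrite | github.com/divyesh27/temp | PythonPractice/src/PadSpaceTextJustification.py | text_justify
-- ===== SOURCE A (Python) =====
-- def text_justify(input_string: str, pad_space: int) -> str:
--     """
--     Justify the input string to ensure the total length is equal to `pad_space`.
--     """
--     if not isinstance(input_string, str) or not isinstance(pad_space, int):
--         raise ValueError("Input must be a string and pad_space must be an integer.")
--     if input_string is None or pad_space < len(input_string):
--         return input_string
--
--     words = input_string.split()
--     if not words:
--         return input_string
--
--     num_of_words = len(words)
--     total_length = len(input_string)
--     space = pad_space - total_length + num_of_words - 1
--
--     quo = space // num_of_words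
--     rem = space % num_of_words
--
--     sb = []
--     for i in range(num_of_words):
--         sb.append(words[i])
--         if i < num_of_words - 1:
--             sb.append(' ' * (quo + 1))
--             if rem > 0:
--                 sb.append(' ')
--                 rem -= 1
--
--     return ''.join(sb)
-- ===== SOURCE B (Python) =====
-- def text_justify(input_string: str, pad_space: int) -> str:
--     """
--     Justify the input string to ensure the total length is equal to `pad_space`.
--     """
--     if not isinstance(input_string, str) or not isinstance(pad_space, int):
--         raise ValueError("Input must be a string and pad_space must be an integer.")
--     if input_string is None or pad_space < len(input_string):
--         return input_string
--
--     words = input_string.split()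
--     if not words:
--         return input_string
--
--     num_of_words = len(words)
--     space = pad_space - len(input_string) + num_of_words - 1
--     quo, rem = divmod(space, num_of_words)
--
--     # Absolute start offset of word j: characters of the previous words plus
--     # the widths of the gaps before it, in closed form.
--     starts = []
--     prefix = 0
--     for j, w in enumerate(words):
--         starts.append(prefix + j * (quo + 1) + min(j, rem))
--         prefix += len(w)
--
--     length = prefix + (num_of_words - 1) * (quo + 1) + min(num_of_words - 1, rem)
--     buf = [' '] * length
--     for w, s in zip(words, starts):
--         buf[s:s + len(w)] = w
--     return ''.join(buf)
-- ===== Notes on version B (the rewrite author's own statement) =====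
-- stated objective: alternative
-- what changed: A builds the result by concatenation in one loop that interleaves words with space chunks while mutating the remainder counter; B instead computes a closed-form absolute start offset for every word (prefix chars + j*(quo+1) + min(j, rem)), preallocates a buffer of spaces of the final length, and overlays each word into the buffer by slice assignment.
import Mathlib
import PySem

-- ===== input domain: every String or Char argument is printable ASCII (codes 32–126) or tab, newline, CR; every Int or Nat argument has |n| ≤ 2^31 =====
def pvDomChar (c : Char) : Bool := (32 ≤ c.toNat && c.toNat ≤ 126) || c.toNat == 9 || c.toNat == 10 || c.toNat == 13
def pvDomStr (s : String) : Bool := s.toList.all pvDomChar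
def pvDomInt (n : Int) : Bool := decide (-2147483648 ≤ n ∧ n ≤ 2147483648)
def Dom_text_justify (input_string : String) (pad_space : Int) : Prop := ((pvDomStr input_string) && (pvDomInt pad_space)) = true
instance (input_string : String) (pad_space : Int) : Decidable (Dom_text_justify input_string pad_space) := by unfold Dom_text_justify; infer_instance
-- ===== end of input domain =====

-- B replaces A's concatenating loop (which interleaves words with space chunks while
-- mutating the remainder counter) by closed-form absolute start offsets and an overlay
-- of the words into a preallocated buffer of spaces (objective: alternative, same cost).

-- shared helper: Python's `' ' * k` (negative k gives the empty string)
def pvSpaces (k : Int) : String := String.ofList (List.replicate k.toNat ' ')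

-- ===== PORT A =====
-- the isinstance guard never fires for (String, Int) arguments; `input_string is None` is always false
def text_justify (input_string : String) (pad_space : Int) : String :=
  if pad_space < (PySem.Str.len input_string : Int) then input_string
  else
    let words := PySem.Str.split₀ input_string
    if words = [] then input_string
    else
      let num_of_words : Int := words.length
      let total_length : Int := PySem.Str.len input_string
      let space := pad_space - total_length + num_of_words - 1
      let quo := PySem.Int.floordiv space num_of_words
      let rem := PySem.Int.mod space num_of_words
      let st := (PySem.List.pyRange 0 num_of_words 1).foldl
        (fun (st : List String × Int) (i : Int) =>
          let sb := st.1 ++ [PySem.List.pyGetD words i ""]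
          if i < num_of_words - 1 then
            let sb := sb ++ [pvSpaces (quo + 1)]
            if st.2 > 0 then (sb ++ [" "], st.2 - 1) else (sb, st.2)
          else (sb, st.2))
        (([] : List String), rem)
      PySem.Str.join "" st.1

-- ===== PORT B =====
-- divmod(space, num_of_words): the divisor is words.length ≠ 0 here, so Python's divmod is (floordiv, mod).
-- buf[s:s+len(w)] = w is ported as take/drop surgery, exact here because 0 ≤ s and
-- s+len(w) ≤ len(buf) always hold for the offsets B computes (proved below);
-- ''.join over a list of single characters is exactly the string of those characters.
def text_justify_alt (input_string : String) (pad_space : Int) : String :=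
  if pad_space < (PySem.Str.len input_string : Int) then input_string
  else
    let words := PySem.Str.split₀ input_string
    if words = [] then input_string
    else
      let num_of_words : Int := words.length
      let space := pad_space - (PySem.Str.len input_string : Int) + num_of_words - 1
      let quo := PySem.Int.floordiv space num_of_words
      let rem := PySem.Int.mod space num_of_words
      let st := (PySem.List.enumerate words 0).foldl
        (fun (st : List Int × Int) (p : Int × String) =>
          (st.1 ++ [st.2 + p.1 * (quo + 1) + min p.1 rem], st.2 + (PySem.Str.len p.2 : Int)))
        (([] : List Int), 0)
      let starts := st.1
      let pre0 := st.2
      let length := pre0 + (num_of_words - 1) * (quo + 1) + min (num_of_words - 1) rem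
      let buf0 := List.replicate length.toNat ' '
      let buf := (words.zip starts).foldl
        (fun (buf : List Char) (p : String × Int) =>
          buf.take p.2.toNat ++ p.1.toList ++ buf.drop (p.2.toNat + p.1.toList.length))
        buf0
      String.ofList buf

-- ===== PRECONDITION & SPEC =====
def Spec_text_justify (input_string : String) (pad_space : Int) (out : String) : Prop := out = text_justify_alt input_string pad_space
instance (input_string : String) (pad_space : Int) (out : String) : Decidable (Spec_text_justify input_string pad_space out) := by unfold Spec_text_justify; infer_instance

-- ===== CLAIM (what is proved, stated in full; the proofs are below) =====
def Claim_equal_text_justify : Prop := ∀ (input_string : String) (pad_space : Int), Dom_text_justify input_string pad_space → Spec_text_justify input_string pad_space (text_justify input_string pad_space)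

-- ===== LEMMAS AND PROOFS =====

-- canonical character-list form of the justified string: word, then quo+1 spaces,
-- then one extra space while rem is still positive, between consecutive words
def pvCanon (quo : Int) : List String → Int → List Char
  | [], _ => []
  | [w], _ => w.toList
  | w :: t :: ts, rem =>
      w.toList ++ List.replicate (quo + 1).toNat ' ' ++
        (if 0 < rem then [' '] else []) ++ pvCanon quo (t :: ts) (rem - 1)

theorem pvCanon_nonpos (quo : Int) : ∀ (ws : List String) (r r' : Int), r ≤ 0 → r' ≤ 0 →
    pvCanon quo ws r = pvCanon quo ws r' := by
  intro ws
  induction ws with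
  | nil => intro r r' _ _; rfl
  | cons w t ih =>
    intro r r' hr hr'
    cases t with
    | nil => rfl
    | cons x xs =>
      simp only [pvCanon]
      rw [if_neg (by omega), if_neg (by omega), ih (r - 1) (r' - 1) (by omega) (by omega)]

theorem pv_toList_spaces (k : Int) : (pvSpaces k).toList = List.replicate k.toNat ' ' := by
  simp [pvSpaces]

theorem pvJoin_empty (L : List (List Char)) : PySem.Chars.join [] L = L.flatten := by
  induction L with
  | nil => rfl
  | cons a t ih =>
    cases t with
    | nil => simp [PySem.Chars.join, List.intercalate]
    | cons b r => rw [PySem.Chars.join_cons_cons, ih]; simp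

theorem pvJoinNil (L : List String) :
    PySem.Str.join "" L = String.ofList ((L.map String.toList).flatten) := by
  unfold PySem.Str.join
  congr 1
  have h0 : ("" : String).toList = [] := rfl
  rw [h0, pvJoin_empty]

-- A's loop, as a fold over the enumerated word list, flattened
theorem pvA_inv (quo n : Int) : ∀ (ws : List String) (s r : Int) (acc : List String),
    n = s + ws.length →
    ((((PySem.List.enumerate ws s).foldl
        (fun (st : List String × Int) (p : Int × String) =>
          let sb := st.1 ++ [p.2]
          if p.1 < n - 1 then
            let sb := sb ++ [pvSpaces (quo + 1)]
            if st.2 > 0 then (sb ++ [" "], st.2 - 1) else (sb, st.2)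
          else (sb, st.2))
        (acc, r)).1).map String.toList).flatten
      = (acc.map String.toList).flatten ++ pvCanon quo ws r := by
  intro ws
  induction ws with
  | nil => intro s r acc _; simp [PySem.List.enumerate_nil, pvCanon]
  | cons w t ih =>
    intro s r acc hn
    rw [PySem.List.enumerate_cons, List.foldl_cons]
    cases t with
    | nil =>
      have hs : ¬ (s < n - 1) := by simp at hn; omega
      simp only [hs, if_false, PySem.List.enumerate_nil, List.foldl_nil, pvCanon]
      simp
    | cons x xs =>
      have hs : s < n - 1 := by simp at hn; omega
      simp only [hs, if_true]
      by_cases hr : r > 0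
      · simp only [hr, if_true]
        rw [ih (s + 1) (r - 1) _ (by simp at hn ⊢; omega)]
        simp [pvCanon, hr, pv_toList_spaces]
      · simp only [hr, if_false]
        rw [ih (s + 1) r _ (by simp at hn ⊢; omega)]
        have : pvCanon quo (x :: xs) r = pvCanon quo (x :: xs) (r - 1) :=
          pvCanon_nonpos quo _ r (r - 1) (by omega) (by omega)
        simp [pvCanon, hr, pv_toList_spaces, this]

-- B's start-offset table, defined structurally
def pvStarts (quo rem : Int) : List String → Int → Int → List Int
  | [], _, _ => []
  | w :: ws, j, c =>
      (c + j * (quo + 1) + min j rem) :: pvStarts quo rem ws (j + 1) (c + (PySem.Str.len w : Int))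

-- B's first loop computes exactly pvStarts and the total word-character count
theorem pvStarts_fold (quo rem : Int) : ∀ (ws : List String) (j c : Int) (acc : List Int),
    (PySem.List.enumerate ws j).foldl
      (fun (st : List Int × Int) (p : Int × String) =>
        (st.1 ++ [st.2 + p.1 * (quo + 1) + min p.1 rem], st.2 + (PySem.Str.len p.2 : Int)))
      (acc, c)
    = (acc ++ pvStarts quo rem ws j c, c + (ws.map (fun w => (PySem.Str.len w : Int))).sum) := by
  intro ws
  induction ws with
  | nil => intro j c acc; simp [PySem.List.enumerate_nil, pvStarts]
  | cons w t ih =>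
    intro j c acc
    rw [PySem.List.enumerate_cons, List.foldl_cons, ih]
    simp [pvStarts]
    ring

-- length of the canonical string
theorem pvCanon_length (quo : Int) (hq : 0 ≤ quo) : ∀ (ws : List String) (rem : Int),
    0 ≤ rem → ws ≠ [] →
    ((pvCanon quo ws rem).length : Int)
      = (ws.map (fun w => (PySem.Str.len w : Int))).sum
        + ((ws.length : Int) - 1) * (quo + 1) + min ((ws.length : Int) - 1) rem := by
  intro ws
  induction ws with
  | nil => intro rem _ h; exact absurd rfl h
  | cons w t ih =>
    intro rem hrem _
    cases t with
    | nil =>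
      simp [pvCanon, PySem.Str.len_eq]
      omega
    | cons x xs =>
      have ihx : ((pvCanon quo (x :: xs) (max (rem - 1) 0)).length : Int)
          = ((x :: xs).map (fun w => (PySem.Str.len w : Int))).sum
            + (((x :: xs).length : Int) - 1) * (quo + 1) + min (((x :: xs).length : Int) - 1) (max (rem - 1) 0) :=
        ih (max (rem - 1) 0) (by omega) (by simp)
      have hcn : pvCanon quo (x :: xs) (rem - 1) = pvCanon quo (x :: xs) (max (rem - 1) 0) := by
        by_cases h : 0 < rem
        · rw [show max (rem - 1) 0 = rem - 1 by omega]
        · exact pvCanon_nonpos quo _ (rem - 1) (max (rem - 1) 0) (by omega) (by omega)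
      simp only [pvCanon, hcn]
      have hmul : ((xs.length : Int) + 1 + 1 - 1) * (quo + 1)
          = ((xs.length : Int) + 1 - 1) * (quo + 1) + (quo + 1) := by ring
      by_cases h : 0 < rem
      · simp only [if_pos h, List.length_append, List.length_replicate, List.length_cons,
          List.length_nil, List.map_cons, List.sum_cons, PySem.Str.len_eq] at ihx ⊢
        push_cast [Int.toNat_of_nonneg (show (0:Int) ≤ quo + 1 by omega)] at ihx ⊢
        rw [hmul]
        generalize ((xs.length : Int) + 1 - 1) * (quo + 1) = P at ihx ⊢
        clear hmul
        simp only [min_def, max_def] at ihx ⊢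
        split_ifs at ihx ⊢ <;> omega
      · simp only [if_neg h, List.length_append, List.length_replicate, List.length_cons,
          List.map_cons, List.sum_cons, PySem.Str.len_eq, List.length_nil] at ihx ⊢
        push_cast [Int.toNat_of_nonneg (show (0:Int) ≤ quo + 1 by omega)] at ihx ⊢
        rw [hmul]
        generalize ((xs.length : Int) + 1 - 1) * (quo + 1) = P at ihx ⊢
        clear hmul
        simp only [min_def, max_def] at ihx ⊢
        split_ifs at ihx ⊢ <;> omega

-- B's overlay loop: writing each word at its pvStarts offset into a buffer of
-- exactly as many spaces as the canonical string is long yields the canonical string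
theorem pvWrite_inv (quo : Int) (hq : 0 ≤ quo) : ∀ (ws : List String) (rem j c : Int) (pre : List Char),
    0 ≤ j → 0 ≤ rem →
    (pre.length : Int) = c + j * (quo + 1) + min j rem →
    (ws.zip (pvStarts quo rem ws j c)).foldl
      (fun (buf : List Char) (p : String × Int) =>
        buf.take p.2.toNat ++ p.1.toList ++ buf.drop (p.2.toNat + p.1.toList.length))
      (pre ++ List.replicate (pvCanon quo ws (rem - j)).length ' ')
    = pre ++ pvCanon quo ws (rem - j) := by
  intro ws
  induction ws with
  | nil => intro rem j c pre _ _ _; simp [pvStarts, pvCanon]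
  | cons w t ih =>
    intro rem j c pre hj hrem hpre
    have hs0 : (c + j * (quo + 1) + min j rem).toNat = pre.length := by omega
    cases t with
    | nil =>
      simp only [pvStarts, List.zip_cons_cons, List.zip_nil_right, List.foldl_cons,
        List.foldl_nil, pvCanon, hs0]
      rw [List.take_left, show pre.length + w.toList.length = (pre ++ List.replicate w.toList.length ' ').length by simp,
        List.drop_length]
      simp
    | cons x xs =>
      rw [show pvStarts quo rem (w :: x :: xs) j c
            = (c + j * (quo + 1) + min j rem)
              :: pvStarts quo rem (x :: xs) (j + 1) (c + (PySem.Str.len w : Int)) from rfl,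
          show pvCanon quo (w :: x :: xs) (rem - j)
            = w.toList ++ List.replicate (quo + 1).toNat ' '
              ++ (if 0 < rem - j then [' '] else []) ++ pvCanon quo (x :: xs) (rem - j - 1) from rfl]
      simp only [List.zip_cons_cons, List.foldl_cons, hs0]
      set e : List Char := if 0 < rem - j then [' '] else [] with he
      set rest : List Char := pvCanon quo (x :: xs) (rem - j - 1) with hrest
      have he' : e = List.replicate e.length ' ' := by
        rw [he]; split <;> rfl
      -- split the buffer of spaces into the region of the first word and the tail
      have hbufsplit : List.replicate (w.toList ++ List.replicate (quo + 1).toNat ' ' ++ e ++ rest).length (' ' : Char)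
          = List.replicate w.toList.length ' ' ++ List.replicate ((quo + 1).toNat + e.length + rest.length) ' ' := by
        rw [← List.replicate_add]
        congr 1
        simp [List.length_append]
        omega
      rw [hbufsplit]
      -- the effect of the first slice assignment
      have htake : (pre ++ (List.replicate w.toList.length ' ' ++ List.replicate ((quo + 1).toNat + e.length + rest.length) ' ')).take pre.length = pre :=
        List.take_left
      have hdrop : (pre ++ (List.replicate w.toList.length ' ' ++ List.replicate ((quo + 1).toNat + e.length + rest.length) ' ')).drop (pre.length + w.toList.length) = List.replicate ((quo + 1).toNat + e.length + rest.length) ' ' := by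
        rw [← List.append_assoc]
        apply List.drop_left'
        simp
      rw [htake, hdrop]
      -- regroup: new prefix absorbs the word and the following gap
      have hregroup : pre ++ w.toList ++ List.replicate ((quo + 1).toNat + e.length + rest.length) ' '
          = (pre ++ w.toList ++ List.replicate (quo + 1).toNat ' ' ++ e) ++ List.replicate (pvCanon quo (x :: xs) (rem - (j + 1))).length ' ' := by
        rw [show rem - (j + 1) = rem - j - 1 by ring, ← hrest, List.replicate_add, List.replicate_add, ← he']
        simp [List.append_assoc]
      rw [hregroup]
      have hpre' : (((pre ++ w.toList ++ List.replicate (quo + 1).toNat ' ' ++ e).length : Int))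
          = (c + (PySem.Str.len w : Int)) + (j + 1) * (quo + 1) + min (j + 1) rem := by
        have helen : (e.length : Int) = if j < rem then 1 else 0 := by
          by_cases h : 0 < rem - j
          · rw [he, if_pos h, if_pos (by omega)]; rfl
          · rw [he, if_neg h, if_neg (by omega)]; rfl
        have hmul : (j + 1) * (quo + 1) = j * (quo + 1) + (quo + 1) := by ring
        simp only [List.length_append, List.length_replicate, PySem.Str.len_eq]
        push_cast [Int.toNat_of_nonneg (show (0:Int) ≤ quo + 1 by omega)]
        rw [hmul]
        generalize j * (quo + 1) = P at hpre ⊢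
        clear hmul
        by_cases h : j < rem
        · rw [if_pos h] at helen; omega
        · rw [if_neg h] at helen; omega
      have hih := ih rem (j + 1) (c + (PySem.Str.len w : Int)) (pre ++ w.toList ++ List.replicate (quo + 1).toNat ' ' ++ e) (by omega) hrem hpre'
      rw [hih, show rem - (j + 1) = rem - j - 1 by ring, ← hrest]
      simp [List.append_assoc]

-- ===== VERDICT (by name: the statement is the Claim_ definition above) =====
theorem text_justify_spec : Claim_equal_text_justify := by
  intro input_string pad_space _
  unfold Spec_text_justify text_justify text_justify_alt
  by_cases h1 : pad_space < (PySem.Str.len input_string : Int)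
  · simp only [if_pos h1]
  · simp only [if_neg h1]
    by_cases h2 : PySem.Str.split₀ input_string = []
    · simp only [if_pos h2]
    · simp only [if_neg h2]
      set ws := PySem.Str.split₀ input_string with hw
      set n : Int := (ws.length : Int) with hn
      set space : Int := pad_space - (PySem.Str.len input_string : Int) + n - 1 with hspace
      set quo := PySem.Int.floordiv space n with hquo
      set rem := PySem.Int.mod space n with hrem
      have hnpos : 0 < n := by
        rw [hn]
        have : ws.length ≠ 0 := by simpa [List.length_eq_zero_iff] using h2
        omega
      have hsp : 0 ≤ space := by rw [hspace]; omega
      have hq : 0 ≤ quo := by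
        rw [hquo, PySem.Int.le_floordiv_iff_mul_le hnpos]
        omega
      have hr : 0 ≤ rem := hrem ▸ PySem.Int.mod_nonneg space hnpos
      -- A's side: the concatenating loop produces the canonical string
      have hA : (((PySem.List.pyRange 0 n 1).foldl
          (fun (st : List String × Int) (i : Int) =>
            let sb := st.1 ++ [PySem.List.pyGetD ws i ""]
            if i < n - 1 then
              let sb := sb ++ [pvSpaces (quo + 1)]
              if st.2 > 0 then (sb ++ [" "], st.2 - 1) else (sb, st.2)
            else (sb, st.2))
          (([] : List String), rem)).1.map String.toList).flatten = pvCanon quo ws rem := by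
        have hA0 := pvA_inv quo n ws 0 rem [] (by rw [hn]; omega)
        rw [PySem.List.enumerate_eq_map_pyRange ws "", List.foldl_map] at hA0
        simp only [PySem.List.len_eq, ← hn, List.map_nil, List.flatten_nil,
          List.nil_append] at hA0
        exact hA0
      -- B's side: the start table and the overlay loop produce the canonical string
      have hSt := pvStarts_fold quo rem ws 0 0 []
      have hLen : ((pvCanon quo ws rem).length : Int)
          = (ws.map (fun w => (PySem.Str.len w : Int))).sum + (n - 1) * (quo + 1) + min (n - 1) rem := by
        rw [pvCanon_length quo hq ws rem hr h2, hn]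
      have hB := pvWrite_inv quo hq ws rem 0 0 [] (by omega) hr (by simp; omega)
      rw [show rem - 0 = rem by ring] at hB
      simp only [List.nil_append] at hB
      -- assemble
      rw [pvJoinNil, hA, hSt]
      simp only [List.nil_append, zero_add]
      rw [show ((ws.map (fun w => (PySem.Str.len w : Int))).sum + (n - 1) * (quo + 1) + min (n - 1) rem)
            = ((pvCanon quo ws rem).length : Int) from hLen.symm, Int.toNat_natCast]
      rw [hB]
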